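-- pv_equiv track=rewrite | github.com/Ochuat/Desafio-Syngenta-2022 | meu_codigo.py | get_cheapest_hotel
-- ===== SOURCE A (Python) =====
-- def get_cheapest_hotel(number):   #DO NOT change the function's name
--
--     #Definindo constantes e configurando aplicação
--     CATEGORIA = 0
--     TAXA_DIA_SEMANA_NORMAL = 1
--     TAXA_DIA_SEMANA_FIDELIDADE = 2
--     TAXA_FIM_SEMANA_NORMAL = 3
--     TAXA_FIM_SEMANA_FIDELIDADE = 4
--     NOME_HOTEL_1 = "Lakewood"
--     PRECOS_HOTEL_1 = [3, 110, 80, 90, 80]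
--     NOME_HOTEL_2 = "Bridgewood"
--     PRECOS_HOTEL_2 = [4, 160, 110, 60, 50]
--     NOME_HOTEL_3 = "Ridgewood"
--     PRECOS_HOTEL_3 = [5, 220, 100, 150, 40]
--     STATUS_CLIENTE_NORMAL = "Regular"
--     MENSAGEM_ERRO = "Erro ao escolher o hotel"
--
--     #Inicializando as variáveis
--     precos = [0, 0, 0]
--     menor_preco = 0
--     indice_menor_preco = 0
--     qtdade_dias_semana = 0
--     qtdade_fim_semana = 0
--
--     #Tratando o dado de entrada para virar informação útil e organizada
--     entrada = str(number)
--     tipo = entrada.split(":")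
--     categoria_cliente = tipo[CATEGORIA]
--     dias = tipo[1].split(",")
--
--     #Calculando o número de diárias em dias de semana e o número de diárias no fim de semana
--     for dia in dias:
--         if "sat" in dia or "sun" in dia:
--             qtdade_fim_semana += 1
--         else:
--             qtdade_dias_semana += 1
--
--     #Tabelando os preços de cada hotel em um dicionário de listas
--     tabela_precos = {NOME_HOTEL_1: PRECOS_HOTEL_1, NOME_HOTEL_2: PRECOS_HOTEL_2,
--                      NOME_HOTEL_3: PRECOS_HOTEL_3}
--
--     #Calculando o valor a se pagar, considerando o tipo de cliente e o tipo de diária (dia da semana vs fim de semana)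
--     for indice, hotel in enumerate (tabela_precos):
--         #preço para clientes normais
--         if categoria_cliente == STATUS_CLIENTE_NORMAL:
--             precos[indice] = (qtdade_dias_semana * tabela_precos[hotel][TAXA_DIA_SEMANA_NORMAL])\
--                              + (qtdade_fim_semana * tabela_precos[hotel][TAXA_FIM_SEMANA_NORMAL])
--         else:#preço para clientes fidelizados
--             precos[indice] = (qtdade_dias_semana * tabela_precos[hotel][TAXA_DIA_SEMANA_FIDELIDADE])\
--                              + (qtdade_fim_semana * tabela_precos[hotel][TAXA_FIM_SEMANA_FIDELIDADE])
--
--     #Procurando o hotel mais barato e, se houver empate, o mais confortável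
--     for indice, preco in enumerate (precos):
--         if indice == 0 or menor_preco >= preco:
--             menor_preco = preco
--             indice_menor_preco = indice
--
--     #Configurando a saída com o nome do hotel mais barato ou confortável
--     if indice_menor_preco == 0:
--         cheapest_hotel = NOME_HOTEL_1
--     elif indice_menor_preco == 1:
--         cheapest_hotel = NOME_HOTEL_2
--     elif indice_menor_preco == 2:
--         cheapest_hotel = NOME_HOTEL_3
--     else:
--         cheapest_hotel = MENSAGEM_ERRO
--
--     return cheapest_hotel
-- ===== SOURCE B (Python) =====
-- def get_cheapest_hotel(number):   #DO NOT change the function's name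
--     # Single accumulating pass over the days (no count-then-multiply, no dict),
--     # then a direct name scan with last-wins on ties.
--     parts = str(number).split(":")
--     category = parts[0]
--     days = parts[1].split(",")
--     regular = category == "Regular"
--     t1 = t2 = t3 = 0
--     for day in days:
--         if "sat" in day or "sun" in day:
--             t1 += 90 if regular else 80
--             t2 += 60 if regular else 50
--             t3 += 150 if regular else 40
--         else:
--             t1 += 110 if regular else 80
--             t2 += 160 if regular else 110
--             t3 += 220 if regular else 100
--     best_name, best_cost = "Lakewood", t1
--     for name, cost in (("Bridgewood", t2), ("Ridgewood", t3)):
--         if best_cost >= cost: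
--             best_name, best_cost = name, cost
--     return best_name
-- ===== Notes on version B (the rewrite author's own statement) =====
-- stated objective: simpler
-- what changed: Replaced A's count-weekend/weekday-then-multiply with its dict of rate lists, pySet-indexed price array and index-based argmin by a single accumulating pass over the days keeping three running totals and a direct name-carrying last-wins scan of the three totals.
import Mathlib
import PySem

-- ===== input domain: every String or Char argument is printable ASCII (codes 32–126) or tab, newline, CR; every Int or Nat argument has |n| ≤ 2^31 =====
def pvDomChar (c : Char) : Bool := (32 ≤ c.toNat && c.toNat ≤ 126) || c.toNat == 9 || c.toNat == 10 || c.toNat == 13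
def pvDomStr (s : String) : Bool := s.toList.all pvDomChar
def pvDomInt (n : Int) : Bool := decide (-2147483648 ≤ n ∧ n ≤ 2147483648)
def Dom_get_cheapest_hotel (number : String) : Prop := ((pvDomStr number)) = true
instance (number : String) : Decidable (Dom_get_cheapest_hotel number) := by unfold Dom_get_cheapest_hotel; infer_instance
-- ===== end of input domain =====

-- B replaces A's count-then-multiply + dict/price-array/argmin-by-index with one
-- accumulating pass over the days and a name-carrying last-wins scan (objective: simpler).

-- ===== PORT A =====
def get_cheapest_hotel (number : String) : String :=
  let entrada := number.toList
  let tipo := PySem.Chars.splitOn entrada ":".toList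
  let categoria_cliente := PySem.List.pyGetD tipo 0 []
  let dias := PySem.Chars.splitOn (PySem.List.pyGetD tipo 1 []) ",".toList
  -- first loop: count weekend vs weekday days
  let counts := dias.foldl (fun (st : Int × Int) dia =>
      if PySem.Chars.isIn "sat".toList dia || PySem.Chars.isIn "sun".toList dia
      then (st.1 + 1, st.2) else (st.1, st.2 + 1)) (0, 0)
  let qtdade_fim_semana := counts.1
  let qtdade_dias_semana := counts.2
  let tabela : PySem.Dict String (List Int) :=
    PySem.Dict.ofList [("Lakewood", [3,110,80,90,80]), ("Bridgewood", [4,160,110,60,50]),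
                       ("Ridgewood", [5,220,100,150,40])]
  -- second loop: fill precos[indice] for each hotel in the dict
  let precos := (PySem.List.enumerate (PySem.Dict.keys tabela)).foldl
    (fun (precos : List Int) (p : Int × String) =>
      let prices := PySem.Dict.getD tabela p.2 []
      if categoria_cliente == "Regular".toList then
        PySem.List.pySetD precos p.1
          (qtdade_dias_semana * PySem.List.pyGetD prices 1 0
            + qtdade_fim_semana * PySem.List.pyGetD prices 3 0)
      else
        PySem.List.pySetD precos p.1
          (qtdade_dias_semana * PySem.List.pyGetD prices 2 0
            + qtdade_fim_semana * PySem.List.pyGetD prices 4 0))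
    ([0, 0, 0] : List Int)
  -- third loop: argmin with last-wins ties
  let sel := (PySem.List.enumerate precos).foldl
    (fun (st : Int × Int) (p : Int × Int) =>
      if p.1 == 0 || st.1 ≥ p.2 then (p.2, p.1) else st) (0, 0)
  let indice_menor_preco := sel.2
  if indice_menor_preco == 0 then "Lakewood"
  else if indice_menor_preco == 1 then "Bridgewood"
  else if indice_menor_preco == 2 then "Ridgewood"
  else "Erro ao escolher o hotel"

-- ===== PORT B =====
def get_cheapest_hotel_alt (number : String) : String :=
  let parts := PySem.Chars.splitOn number.toList ":".toList
  let category := PySem.List.pyGetD parts 0 []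
  let days := PySem.Chars.splitOn (PySem.List.pyGetD parts 1 []) ",".toList
  let regular := category == "Regular".toList
  let totals := days.foldl (fun (t : Int × Int × Int) day =>
      if PySem.Chars.isIn "sat".toList day || PySem.Chars.isIn "sun".toList day then
        (t.1 + (if regular then 90 else 80), t.2.1 + (if regular then 60 else 50),
         t.2.2 + (if regular then 150 else 40))
      else
        (t.1 + (if regular then 110 else 80), t.2.1 + (if regular then 160 else 110),
         t.2.2 + (if regular then 220 else 100)))
    ((0, 0, 0) : Int × Int × Int)
  let best := [("Bridgewood", totals.2.1), ("Ridgewood", totals.2.2)].foldl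
    (fun (b : String × Int) c => if b.2 ≥ c.2 then c else b) ("Lakewood", totals.1)
  best.1

-- ===== PRECONDITION & SPEC =====
-- Pre_ excludes exactly the inputs lacking a colon separator, on which Python A raises IndexError at tipo[1].
def Pre_get_cheapest_hotel (number : String) : Prop :=
  2 ≤ (PySem.Chars.splitOn number.toList ":".toList).length
instance (number : String) : Decidable (Pre_get_cheapest_hotel number) := by
  unfold Pre_get_cheapest_hotel; infer_instance
def pvWitness_get_cheapest_hotel : String := "Regular: mon, sat"

def Spec_get_cheapest_hotel (number : String) (out : String) : Prop := out = get_cheapest_hotel_alt number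
instance (number : String) (out : String) : Decidable (Spec_get_cheapest_hotel number out) := by unfold Spec_get_cheapest_hotel; infer_instance

-- ===== CLAIM (what is proved, stated in full; the proofs are below) =====
def Claim_equal_get_cheapest_hotel : Prop := ∀ (number : String), Dom_get_cheapest_hotel number → Pre_get_cheapest_hotel number → Spec_get_cheapest_hotel number (get_cheapest_hotel number)

-- ===== LEMMAS AND PROOFS =====

-- B's running totals equal A's (count of weekdays, count of weekends) times the rates.
theorem totals_eq (r1 r2 r3 r4 r5 r6 : Int) (dias : List (List Char)) (a b c w d : Int) :
    dias.foldl (fun (t : Int × Int × Int) day =>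
      if PySem.Chars.isIn "sat".toList day || PySem.Chars.isIn "sun".toList day then
        (t.1 + r2, t.2.1 + r4, t.2.2 + r6)
      else
        (t.1 + r1, t.2.1 + r3, t.2.2 + r5)) (a, b, c)
    =
    (a + ((dias.foldl (fun (st : Int × Int) dia =>
            if PySem.Chars.isIn "sat".toList dia || PySem.Chars.isIn "sun".toList dia
            then (st.1 + 1, st.2) else (st.1, st.2 + 1)) (w, d)).2 - d) * r1
       + ((dias.foldl (fun (st : Int × Int) dia =>
            if PySem.Chars.isIn "sat".toList dia || PySem.Chars.isIn "sun".toList dia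
            then (st.1 + 1, st.2) else (st.1, st.2 + 1)) (w, d)).1 - w) * r2,
     b + ((dias.foldl (fun (st : Int × Int) dia =>
            if PySem.Chars.isIn "sat".toList dia || PySem.Chars.isIn "sun".toList dia
            then (st.1 + 1, st.2) else (st.1, st.2 + 1)) (w, d)).2 - d) * r3
       + ((dias.foldl (fun (st : Int × Int) dia =>
            if PySem.Chars.isIn "sat".toList dia || PySem.Chars.isIn "sun".toList dia
            then (st.1 + 1, st.2) else (st.1, st.2 + 1)) (w, d)).1 - w) * r4,
     c + ((dias.foldl (fun (st : Int × Int) dia =>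
            if PySem.Chars.isIn "sat".toList dia || PySem.Chars.isIn "sun".toList dia
            then (st.1 + 1, st.2) else (st.1, st.2 + 1)) (w, d)).2 - d) * r5
       + ((dias.foldl (fun (st : Int × Int) dia =>
            if PySem.Chars.isIn "sat".toList dia || PySem.Chars.isIn "sun".toList dia
            then (st.1 + 1, st.2) else (st.1, st.2 + 1)) (w, d)).1 - w) * r6) := by
  induction dias generalizing a b c w d with
  | nil =>
    simp only [List.foldl_nil, Prod.mk.injEq]
    refine ⟨by ring, by ring, by ring⟩
  | cons dia rest ih =>
    simp only [List.foldl_cons]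
    by_cases h : (PySem.Chars.isIn "sat".toList dia || PySem.Chars.isIn "sun".toList dia) = true
    · simp only [h, if_true]
      rw [ih (a + r2) (b + r4) (c + r6) (w + 1) d]
      simp only [Prod.mk.injEq]
      refine ⟨by ring, by ring, by ring⟩
    · simp only [h, if_false, Bool.false_eq_true]
      rw [ih (a + r1) (b + r3) (c + r5) w (d + 1)]
      simp only [Prod.mk.injEq]
      refine ⟨by ring, by ring, by ring⟩

-- ===== VERDICT (by name: the statement is the Claim_ definition above) =====
-- closed-shape reductions used by the main proof (rfl facts with symbolic entries)
theorem pset3 (x y z : Int) :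
    PySem.List.pySetD (PySem.List.pySetD (PySem.List.pySetD ([0, 0, 0] : List Int) 0 x) 1 y) 2 z
      = [x, y, z] := rfl

theorem enum3 (x y z : Int) :
    PySem.List.enumerate [x, y, z] = [(0, x), (1, y), (2, z)] := rfl

set_option maxHeartbeats 1000000 in
theorem get_cheapest_hotel_spec : Claim_equal_get_cheapest_hotel := by
  intro number _ _
  unfold Spec_get_cheapest_hotel
  simp only [get_cheapest_hotel, get_cheapest_hotel_alt]
  rw [totals_eq (w := 0) (d := 0)]
  generalize hF : (List.foldl (fun (st : Int × Int) dia =>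
      if PySem.Chars.isIn "sat".toList dia || PySem.Chars.isIn "sun".toList dia
      then (st.1 + 1, st.2) else (st.1, st.2 + 1)) ((0 : Int), (0 : Int))
      (PySem.Chars.splitOn (PySem.List.pyGetD (PySem.Chars.splitOn number.toList ":".toList) 1 [])
        ",".toList)) = F
  obtain ⟨W, D⟩ := F
  rw [show PySem.Dict.keys (PySem.Dict.ofList
        ([("Lakewood", ([3,110,80,90,80] : List Int)), ("Bridgewood", [4,160,110,60,50]),
          ("Ridgewood", [5,220,100,150,40])]))
      = ["Lakewood", "Bridgewood", "Ridgewood"] from rfl]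
  rw [show PySem.List.enumerate ["Lakewood", "Bridgewood", "Ridgewood"]
      = [(0, "Lakewood"), (1, "Bridgewood"), (2, "Ridgewood")] from rfl]
  by_cases hreg : (PySem.List.pyGetD (PySem.Chars.splitOn number.toList ":".toList) 0 []
      == "Regular".toList) = true
  · simp only [hreg, if_true]
    simp only [List.foldl_cons, List.foldl_nil]
    simp only [show PySem.Dict.getD (PySem.Dict.ofList
          ([("Lakewood", ([3,110,80,90,80] : List Int)), ("Bridgewood", [4,160,110,60,50]),
            ("Ridgewood", [5,220,100,150,40])])) "Lakewood" [] = [3,110,80,90,80] from rfl,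
        show PySem.Dict.getD (PySem.Dict.ofList
          ([("Lakewood", ([3,110,80,90,80] : List Int)), ("Bridgewood", [4,160,110,60,50]),
            ("Ridgewood", [5,220,100,150,40])])) "Bridgewood" [] = [4,160,110,60,50] from rfl,
        show PySem.Dict.getD (PySem.Dict.ofList
          ([("Lakewood", ([3,110,80,90,80] : List Int)), ("Bridgewood", [4,160,110,60,50]),
            ("Ridgewood", [5,220,100,150,40])])) "Ridgewood" [] = [5,220,100,150,40] from rfl]
    simp only [show PySem.List.pyGetD ([3,110,80,90,80] : List Int) 1 0 = 110 from rfl,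
        show PySem.List.pyGetD ([3,110,80,90,80] : List Int) 3 0 = 90 from rfl,
        show PySem.List.pyGetD ([4,160,110,60,50] : List Int) 1 0 = 160 from rfl,
        show PySem.List.pyGetD ([4,160,110,60,50] : List Int) 3 0 = 60 from rfl,
        show PySem.List.pyGetD ([5,220,100,150,40] : List Int) 1 0 = 220 from rfl,
        show PySem.List.pyGetD ([5,220,100,150,40] : List Int) 3 0 = 150 from rfl]
    simp only [pset3, enum3]
    simp only [List.foldl_cons, List.foldl_nil]
    ring_nf
    split_ifs <;>
      simp_all only [Bool.or_eq_true, decide_eq_true_eq, beq_iff_eq, not_or, Int.reduceEq,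
        false_or, or_false, not_false_iff, Bool.false_eq_true]
  · simp only [hreg, if_false, Bool.false_eq_true]
    simp only [List.foldl_cons, List.foldl_nil]
    simp only [show PySem.Dict.getD (PySem.Dict.ofList
          ([("Lakewood", ([3,110,80,90,80] : List Int)), ("Bridgewood", [4,160,110,60,50]),
            ("Ridgewood", [5,220,100,150,40])])) "Lakewood" [] = [3,110,80,90,80] from rfl,
        show PySem.Dict.getD (PySem.Dict.ofList
          ([("Lakewood", ([3,110,80,90,80] : List Int)), ("Bridgewood", [4,160,110,60,50]),
            ("Ridgewood", [5,220,100,150,40])])) "Bridgewood" [] = [4,160,110,60,50] from rfl,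
        show PySem.Dict.getD (PySem.Dict.ofList
          ([("Lakewood", ([3,110,80,90,80] : List Int)), ("Bridgewood", [4,160,110,60,50]),
            ("Ridgewood", [5,220,100,150,40])])) "Ridgewood" [] = [5,220,100,150,40] from rfl]
    simp only [show PySem.List.pyGetD ([3,110,80,90,80] : List Int) 2 0 = 80 from rfl,
        show PySem.List.pyGetD ([3,110,80,90,80] : List Int) 4 0 = 80 from rfl,
        show PySem.List.pyGetD ([4,160,110,60,50] : List Int) 2 0 = 110 from rfl,
        show PySem.List.pyGetD ([4,160,110,60,50] : List Int) 4 0 = 50 from rfl,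
        show PySem.List.pyGetD ([5,220,100,150,40] : List Int) 2 0 = 100 from rfl,
        show PySem.List.pyGetD ([5,220,100,150,40] : List Int) 4 0 = 40 from rfl]
    simp only [pset3, enum3]
    simp only [List.foldl_cons, List.foldl_nil]
    ring_nf
    split_ifs <;>
      simp_all only [Bool.or_eq_true, decide_eq_true_eq, beq_iff_eq, not_or, Int.reduceEq,
        false_or, or_false, not_false_iff, Bool.false_eq_true]
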